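-- pv_equiv track=rewrite | github.com/conorwalker/template_switching | analysis/process_msas/find_events.py | remove_gap_cols
-- ===== SOURCE A (Python) =====
-- def remove_gap_cols(seq1, seq2):
--     """
--     Remove gap only columns from the pairwise alignment.
--     """
--     keep_cols = []
--     assert len(seq1) == len(seq2)
--     for i in range(len(seq1)):
--         if seq1[i] == "-" and seq2[i] == "-":
--             continue
--         else:
--             keep_cols.append(i)
--     seq1 = "".join([seq1[i] for i in keep_cols])
--     seq2 = "".join([seq2[i] for i in keep_cols])
--     return seq1, seq2
-- ===== SOURCE B (Python) =====
-- def remove_gap_cols(seq1, seq2):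
--     """
--     Remove gap only columns from the pairwise alignment.
--     """
--     assert len(seq1) == len(seq2)
--     r1 = []
--     r2 = []
--     for c1, c2 in zip(seq1, seq2):
--         if c1 == "-" and c2 == "-":
--             continue
--         r1.append(c1)
--         r2.append(c2)
--     return "".join(r1), "".join(r2)
-- ===== Notes on version B (the rewrite author's own statement) =====
-- stated objective: simpler
-- what changed: Single pass over zipped character pairs building both outputs directly, eliminating the intermediate keep_cols index list and the two index-driven re-scans.
import Mathlib
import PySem

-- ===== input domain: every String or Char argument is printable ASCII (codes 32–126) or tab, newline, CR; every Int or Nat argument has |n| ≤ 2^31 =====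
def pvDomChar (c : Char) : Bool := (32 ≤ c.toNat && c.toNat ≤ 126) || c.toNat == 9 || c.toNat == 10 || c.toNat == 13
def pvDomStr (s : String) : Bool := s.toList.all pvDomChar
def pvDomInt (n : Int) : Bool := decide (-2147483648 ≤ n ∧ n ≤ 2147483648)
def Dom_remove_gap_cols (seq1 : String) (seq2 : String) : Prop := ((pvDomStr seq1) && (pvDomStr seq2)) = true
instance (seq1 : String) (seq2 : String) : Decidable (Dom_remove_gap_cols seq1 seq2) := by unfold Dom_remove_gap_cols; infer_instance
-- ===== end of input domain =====

-- B replaces A's index-list construction and two index re-scans with one direct pass over paired characters (objective: simpler).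


-- ===== PORT A =====
-- Literal port: build keep_cols over range(len(seq1)), then join the two indexed comprehensions.
-- (indices taken from keep_cols are always in range, so getD's default is never used)
def remove_gap_cols (seq1 : String) (seq2 : String) : String × String :=
  let l1 := seq1.toList
  let l2 := seq2.toList
  let keep_cols := (List.range l1.length).foldl
    (fun acc i => if l1.getD i ' ' = '-' ∧ l2.getD i ' ' = '-' then acc else acc ++ [i]) []
  (String.ofList (keep_cols.map (fun i => l1.getD i ' ')),
   String.ofList (keep_cols.map (fun i => l2.getD i ' ')))

-- ===== PORT B =====
-- one pass over the zipped character lists, building both results directly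
def rgcGo : List Char → List Char → List Char × List Char
  | c1 :: t1, c2 :: t2 =>
      let r := rgcGo t1 t2
      if c1 = '-' ∧ c2 = '-' then r else (c1 :: r.1, c2 :: r.2)
  | _, _ => ([], [])

def remove_gap_cols_alt (seq1 : String) (seq2 : String) : String × String :=
  let r := rgcGo seq1.toList seq2.toList
  (String.ofList r.1, String.ofList r.2)

-- ===== PRECONDITION & SPEC =====
-- Pre_: A's assert demands equal lengths (AssertionError otherwise).
def Pre_remove_gap_cols (seq1 : String) (seq2 : String) : Prop := seq1.length = seq2.length
instance (seq1 : String) (seq2 : String) : Decidable (Pre_remove_gap_cols seq1 seq2) := by unfold Pre_remove_gap_cols; infer_instance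
def pvWitness_remove_gap_cols : String × String := ("a-b", "--b")

def Spec_remove_gap_cols (seq1 : String) (seq2 : String) (out : String × String) : Prop := out = remove_gap_cols_alt seq1 seq2
instance (seq1 : String) (seq2 : String) (out : String × String) : Decidable (Spec_remove_gap_cols seq1 seq2 out) := by unfold Spec_remove_gap_cols; infer_instance

-- ===== CLAIM (what is proved, stated in full; the proofs are below) =====
def Claim_equal_remove_gap_cols : Prop := ∀ (seq1 : String) (seq2 : String), Dom_remove_gap_cols seq1 seq2 → Pre_remove_gap_cols seq1 seq2 → Spec_remove_gap_cols seq1 seq2 (remove_gap_cols seq1 seq2)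

-- ===== LEMMAS AND PROOFS =====

-- A's 'continue'-shaped loop is the filter of the skipped condition's negation
theorem rgc_foldl_skip_eq_filter (p : Nat → Prop) [DecidablePred p] (l : List Nat) (acc : List Nat) :
    l.foldl (fun acc i => if p i then acc else acc ++ [i]) acc
      = acc ++ l.filter (fun i => decide ¬ p i) := by
  induction l generalizing acc with
  | nil => simp
  | cons x t ih =>
      by_cases h : p x <;> simp [List.foldl_cons, h, ih] 

theorem rgc_main (l1 l2 : List Char) (h : l1.length = l2.length) :
    (((List.range l1.length).filter
        (fun i => decide ¬ (l1.getD i ' ' = '-' ∧ l2.getD i ' ' = '-'))).map (fun i => l1.getD i ' '),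
     ((List.range l1.length).filter
        (fun i => decide ¬ (l1.getD i ' ' = '-' ∧ l2.getD i ' ' = '-'))).map (fun i => l2.getD i ' '))
      = rgcGo l1 l2 := by
  induction l1 generalizing l2 with
  | nil => cases l2 <;> simp_all [rgcGo]
  | cons c1 t1 ih =>
      cases l2 with
      | nil => simp at h
      | cons c2 t2 =>
        have h' : t1.length = t2.length := by simpa using h
        have hr := ih t2 h'
        by_cases hc : c1 = '-' ∧ c2 = '-'
        · simp only [List.length_cons, List.range_succ_eq_map, List.filter_cons,
            List.getD_cons_zero, hc,
            List.filter_map, Function.comp_def, rgcGo]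
          simpa using hr
        · simp only [List.length_cons, List.range_succ_eq_map, List.filter_cons,
            List.getD_cons_zero, hc,
            List.filter_map, Function.comp_def, rgcGo]
          simp [← hr]

-- ===== VERDICT (by name: the statement is the Claim_ definition above) =====
theorem remove_gap_cols_spec : Claim_equal_remove_gap_cols := by
  intro seq1 seq2 _ hpre
  have hlen : seq1.toList.length = seq2.toList.length := by
    unfold Pre_remove_gap_cols at hpre
    rw [String.length_toList, String.length_toList]
    exact hpre
  have hm := rgc_main seq1.toList seq2.toList hlen
  simp only [Spec_remove_gap_cols, remove_gap_cols, remove_gap_cols_alt]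
  rw [rgc_foldl_skip_eq_filter
    (fun i => seq1.toList.getD i ' ' = '-' ∧ seq2.toList.getD i ' ' = '-')]
  simp only [List.nil_append]
  rw [← hm]
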